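-- pv_equiv track=rewrite | github.com/dmarek03/ALGORITHM_AND_DATA_STRUCTURE | extra_exams/egzP8a_reklamy_binary_search.py | reklamy
-- ===== SOURCE A (Python) =====
-- def iterative_binary_search(tab: list[int], left: int, right: int, x: int) -> int:
--
--     while left < right:
--         mid = (left+right)//2
--
--         if tab[mid] > x:
--             right = mid
--
--         else:
--             left = mid+1
--
--     return left
--
-- def reklamy ( T, S, o ):
--     n = len(T)
--     p = [[] for _ in range(n)]
--     for i in range(n):
--         p[i] = [T[i][0], T[i][1],  S[i]]
--     p.sort(key=lambda x: x[0])
--     result = 0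
--     m = [0 for _ in range(n)]
--     # Do ostatniego indeksu tablicy m przypisujemy wartość ostatneigo okres z tablicy p
--     m[n-1] = p[n-1][2]
--     # Dla każdego okresu znajdujemy maksymalny zysk, który obliczamy jako maksikum z elementu poprzedniego albo
--     # możliwego zysku z i-tego okresu.
--     for i in range(n-2, -1, -1):
--         m[i] = max(m[i+1], p[i][2])
--
--     # Tworzymy tablicę z początkami okresów, dla ułatwienia podczas korzystania z binary searcha
--     s = [p[i][0] for i in range(n)]
--     # Dla każdego okresu sprawdzamy czy istnieje inny okres nie zachodzący na obecny okres i jesli taki okres istnieje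
--     # to sprawdzamy czy suma obcenie rozpatrywanego okresu i znalezionego okresu jest większa niż obecna  wartosć result
--     for i in range(n):
--         end = p[i][1]
--         idx = iterative_binary_search(s, 0, n, end)
--         second = 0
--         if idx < n and s[idx] != end:
--             second = m[idx]
--         result = max(result, p[i][2]+second)
--
--     return result
-- ===== SOURCE B (Python) =====
-- def reklamy(T, S, o):
--     iv = [(T[i][0], T[i][1], S[i]) for i in range(len(T))]
--     result = 0
--     for _, e, v in iv:
--         cands = [v2 for s2, _, v2 in iv if s2 > e]
--         second = max(cands) if cands else 0
--         result = max(result, v + second)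
--     return result
-- ===== Notes on version B (the rewrite author's own statement) =====
-- stated objective: simpler
-- what changed: Replaced sort + suffix-max array + per-interval binary search by a direct quadratic scan: for each interval take the max value among intervals starting strictly after its end; Pre_ excludes inputs where A raises (empty T, rows shorter than 2, S shorter than T).
-- crash fix: On empty T (any S, o) A raises IndexError at m[n-1]; B returns 0, the profit of choosing no interval. — e.g. on reklamy([], [], 0): A raises IndexError, B returns 0
import Mathlib
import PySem

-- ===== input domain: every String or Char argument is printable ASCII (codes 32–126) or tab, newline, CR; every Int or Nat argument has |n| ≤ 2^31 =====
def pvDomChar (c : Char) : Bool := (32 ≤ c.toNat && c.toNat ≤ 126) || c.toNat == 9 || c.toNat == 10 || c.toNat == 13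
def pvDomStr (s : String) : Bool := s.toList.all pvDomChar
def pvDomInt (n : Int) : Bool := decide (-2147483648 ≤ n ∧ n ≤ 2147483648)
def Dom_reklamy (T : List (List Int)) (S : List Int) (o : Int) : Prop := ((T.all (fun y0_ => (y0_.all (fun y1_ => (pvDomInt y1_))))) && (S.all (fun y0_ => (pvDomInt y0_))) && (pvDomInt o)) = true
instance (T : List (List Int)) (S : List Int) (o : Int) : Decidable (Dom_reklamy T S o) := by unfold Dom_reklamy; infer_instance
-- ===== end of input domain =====

-- B replaces A's sort + suffix-max array + per-interval binary search by a direct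
-- quadratic scan (simpler, not faster); equivalence of the RETURN value is proved below.

-- ===== PORT A =====
-- while left < right: … (fuel = right-left, which strictly decreases each iteration)
def iterative_binary_search_go (tab : List Int) (x : Int) : Nat → Int → Int → Int
  | 0, left, _right => left
  | f + 1, left, right =>
    if left < right then
      let mid := PySem.Int.floordiv (left + right) 2
      if PySem.List.pyGetD tab mid 0 > x then
        iterative_binary_search_go tab x f left mid
      else
        iterative_binary_search_go tab x f (mid + 1) right
    else left

def iterative_binary_search (tab : List Int) (left right x : Int) : Int :=
  iterative_binary_search_go tab x (right - left).toNat left right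

-- p[i] = [T[i][0], T[i][1], S[i]] for i in range(n)
def pvA_mkP (T : List (List Int)) (S : List Int) : List (Int × Int × Int) :=
  (List.range T.length).map (fun i =>
    (PySem.List.pyGetD (PySem.List.pyGetD T (i : Int) []) 0 0,
     PySem.List.pyGetD (PySem.List.pyGetD T (i : Int) []) 1 0,
     PySem.List.pyGetD S (i : Int) 0))

-- m = [0]*n; m[n-1] = p[n-1][2]; for i in range(n-2, -1, -1): m[i] = max(m[i+1], p[i][2])
def pvA_m (p : List (Int × Int × Int)) (n : Nat) : List Int :=
  (PySem.List.pyRange ((n : Int) - 2) (-1) (-1)).foldl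
    (fun mm i => mm.set i.toNat
      (max (PySem.List.pyGetD mm (i + 1) 0) (PySem.List.pyGetD p i (0, 0, 0)).2.2))
    ((List.replicate n 0).set (n - 1) (PySem.List.pyGetD p ((n : Int) - 1) (0, 0, 0)).2.2)

-- idx = iterative_binary_search(s, 0, n, end); second = m[idx] if idx < n and s[idx] != end else 0
def pvA_second (s m : List Int) (n : Nat) (e : Int) : Int :=
  let idx := iterative_binary_search s 0 (n : Int) e
  if idx < (n : Int) ∧ PySem.List.pyGetD s idx 0 ≠ e then PySem.List.pyGetD m idx 0 else 0

def reklamy (T : List (List Int)) (S : List Int) (o : Int) : Int :=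
  let n := T.length
  let p := PySem.List.sorted (pvA_mkP T S) (fun t => t.1) false
  let m := pvA_m p n
  let s := p.map (fun t => t.1)
  p.foldl (fun result t => max result (t.2.2 + pvA_second s m n t.2.1)) 0

-- ===== PORT B =====
-- iv = [(T[i][0], T[i][1], S[i]) for i in range(len(T))]
def pvB_mkIv (T : List (List Int)) (S : List Int) : List (Int × Int × Int) :=
  (List.range T.length).map (fun i =>
    (PySem.List.pyGetD (PySem.List.pyGetD T (i : Int) []) 0 0,
     PySem.List.pyGetD (PySem.List.pyGetD T (i : Int) []) 1 0,
     PySem.List.pyGetD S (i : Int) 0))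

-- cands = [v2 for s2, _, v2 in iv if s2 > e]; second = max(cands) if cands else 0
def pvB_second (iv : List (Int × Int × Int)) (e : Int) : Int :=
  match PySem.List.max? ((iv.filter (fun u => e < u.1)).map (fun u => u.2.2)) (fun y => y) with
  | some mx => mx
  | none => 0

def reklamy_alt (T : List (List Int)) (S : List Int) (o : Int) : Int :=
  (pvB_mkIv T S).foldl
    (fun result t => max result (t.2.2 + pvB_second (pvB_mkIv T S) t.2.1)) 0

-- ===== PRECONDITION & SPEC =====
-- Pre_ excludes exactly the inputs where Python A raises: empty T (IndexError at m[n-1]),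
-- a row of T with fewer than 2 entries (T[i][1]), or S shorter than T (S[i]).
def Pre_reklamy (T : List (List Int)) (S : List Int) (o : Int) : Prop :=
  T ≠ [] ∧ T.length ≤ S.length ∧ ∀ row ∈ T, 2 ≤ row.length
instance (T : List (List Int)) (S : List Int) (o : Int) : Decidable (Pre_reklamy T S o) := by
  unfold Pre_reklamy; infer_instance

def pvWitness_reklamy : List (List Int) × List Int × Int := ([[1, 2], [3, 4]], [5, 6], 0)

-- On empty T (any S, o) Python A raises IndexError at m[n-1]; B returns 0 (no interval chosen).
def Raises_reklamy (T : List (List Int)) (S : List Int) (o : Int) : Prop := T = []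
instance (T : List (List Int)) (S : List Int) (o : Int) : Decidable (Raises_reklamy T S o) := by
  unfold Raises_reklamy; infer_instance
def pvRaiseWitness_reklamy : List (List Int) × List Int × Int := ([], [], 0)
def pvRaiseWitnessOut_reklamy : Int := 0

def Spec_reklamy (T : List (List Int)) (S : List Int) (o : Int) (out : Int) : Prop :=
  out = reklamy_alt T S o
instance (T : List (List Int)) (S : List Int) (o : Int) (out : Int) : Decidable (Spec_reklamy T S o out) := by
  unfold Spec_reklamy; infer_instance

-- ===== CLAIM (what is proved, stated in full; the proofs are below) =====
def Claim_equal_reklamy : Prop := ∀ (T : List (List Int)) (S : List Int) (o : Int),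
  Dom_reklamy T S o → Pre_reklamy T S o → Spec_reklamy T S o (reklamy T S o)

def Claim_raises_reklamy : Prop :=
  (∀ (T : List (List Int)) (S : List Int) (o : Int), Dom_reklamy T S o → Raises_reklamy T S o → ¬ Pre_reklamy T S o) ∧
  (Dom_reklamy (pvRaiseWitness_reklamy.1) (pvRaiseWitness_reklamy.2.1) (pvRaiseWitness_reklamy.2.2) ∧
   Raises_reklamy (pvRaiseWitness_reklamy.1) (pvRaiseWitness_reklamy.2.1) (pvRaiseWitness_reklamy.2.2) ∧
   reklamy_alt (pvRaiseWitness_reklamy.1) (pvRaiseWitness_reklamy.2.1) (pvRaiseWitness_reklamy.2.2) = pvRaiseWitnessOut_reklamy)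

-- ===== LEMMAS AND PROOFS =====

-- suffix maximum of the values of p from position j on (0 if the suffix is empty)
def pvSfx (p : List (Int × Int × Int)) (j : Nat) : Int :=
  match (p.drop j).map (fun t => t.2.2) with
  | [] => 0
  | h :: t => t.foldl max h

lemma pyRange_negstep_nil (a : Int) (h : a ≤ -1) :
    PySem.List.pyRange a (-1) (-1) = [] := by
  simp only [PySem.List.pyRange]
  norm_num
  omega

lemma pyRange_negstep_cons (a : Int) (h : 0 ≤ a) :
    PySem.List.pyRange a (-1) (-1) = a :: PySem.List.pyRange (a - 1) (-1) (-1) := by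
  simp only [PySem.List.pyRange]
  norm_num
  rw [if_pos (by omega : (-1:Int) < a)]
  have h1 : (a + 1).toNat = (if 0 < a then a.toNat else 0) + 1 := by split <;> omega
  rw [h1, List.range_succ_eq_map, List.map_cons, List.map_map]
  refine congrArg₂ _ (by omega) (List.map_congr_left ?_)
  intro k _
  simp [Function.comp]
  ring

lemma sfx_last (p : List (Int × Int × Int)) (n : Nat) (hn : p.length = n) (h1 : 1 ≤ n) :
    pvSfx p (n - 1) = (p.getD (n - 1) (0, 0, 0)).2.2 := by
  have hlt : n - 1 < p.length := by omega
  have hdrop : p.drop (n - 1) = [p[n-1]] := by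
    rw [List.drop_eq_getElem_cons hlt]
    rw [List.drop_eq_nil_of_le (by omega)]
  rw [List.getD_eq_getElem p _ hlt]
  simp [pvSfx, hdrop]

lemma sfx_rec (p : List (Int × Int × Int)) (c : Nat) (h : c + 1 < p.length) :
    pvSfx p c = max (p.getD c (0, 0, 0)).2.2 (pvSfx p (c + 1)) := by
  have hc : c < p.length := by omega
  rw [List.getD_eq_getElem p _ hc]
  rw [show pvSfx p c = _ from by rw [pvSfx, List.drop_eq_getElem_cons hc]]
  rw [show pvSfx p (c+1) = _ from by rw [pvSfx, List.drop_eq_getElem_cons h]]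
  rw [show p.drop (c+1) = p[c+1] :: p.drop (c+2) from List.drop_eq_getElem_cons h]
  simp only [List.map_cons, List.foldl_cons]
  exact @List.foldl_assoc _ max ⟨max_assoc⟩ _ _ _

lemma mloop_inv (p : List (Int × Int × Int)) (n : Nat) (hn : p.length = n) :
    ∀ (c : Nat) (mm : List Int), c ≤ n - 1 → mm.length = n →
    (∀ j, j < n → c ≤ j → mm.getD j 0 = pvSfx p j) →
    ((PySem.List.pyRange ((c : Int) - 1) (-1) (-1)).foldl
      (fun mm i => mm.set i.toNat
        (max (PySem.List.pyGetD mm (i + 1) 0) (PySem.List.pyGetD p i (0, 0, 0)).2.2)) mm).length = n ∧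
    ∀ j, j < n →
      ((PySem.List.pyRange ((c : Int) - 1) (-1) (-1)).foldl
        (fun mm i => mm.set i.toNat
          (max (PySem.List.pyGetD mm (i + 1) 0) (PySem.List.pyGetD p i (0, 0, 0)).2.2)) mm).getD j 0 = pvSfx p j := by
  intro c
  induction c with
  | zero =>
    intro mm _ hlen hinv
    rw [pyRange_negstep_nil _ (by omega)]
    exact ⟨hlen, fun j hj => by simpa using hinv j hj (Nat.zero_le j)⟩
  | succ c ih =>
    intro mm hc hlen hinv
    rw [show ((c+1 : Nat) : Int) - 1 = (c : Int) from by push_cast; ring,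
        pyRange_negstep_cons _ (by positivity), List.foldl_cons]
    have hcn : c < n := by omega
    have hc1n : c + 1 < n := by omega
    refine ih _ (by omega) (by simpa using hlen) ?_
    intro j hj hcj
    have htn : (c : Int).toNat = c := by omega
    by_cases hjc : j = c
    · rw [hjc, htn]
      rw [List.getD_eq_getElem _ _ (by rw [List.length_set]; omega)]
      rw [List.getElem_set_self (by simp only [List.length_set, hlen]; omega)]
      have e1 : PySem.List.pyGetD mm ((c : Int) + 1) 0 = pvSfx p (c + 1) := by
        rw [show (c : Int) + 1 = ((c+1 : Nat) : Int) from by push_cast; ring,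
            PySem.List.pyGetD_natCast]
        exact hinv (c+1) hc1n (le_refl _)
      have e2 : PySem.List.pyGetD p (c : Int) (0,0,0) = p.getD c (0,0,0) := by
        rw [PySem.List.pyGetD_natCast]
      rw [e1, e2, sfx_rec p c (by omega), max_comm]
    · rw [List.getD_eq_getElem _ _ (by rw [List.length_set]; omega)]
      rw [htn, List.getElem_set_ne (by omega)]
      rw [← List.getD_eq_getElem mm _ (by omega)]
      exact hinv j hj (by omega)

lemma m_spec (p : List (Int × Int × Int)) (n : Nat) (hn : p.length = n) (hpos : 1 ≤ n) :
    (pvA_m p n).length = n ∧ ∀ j, j < n → (pvA_m p n).getD j 0 = pvSfx p j := by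
  unfold pvA_m
  rw [show (n : Int) - 2 = ((n - 1 : Nat) : Int) - 1 from by omega]
  apply mloop_inv p n hn (n-1) _ (by omega) (by simp)
  intro j hj hj2
  have hjn : j = n - 1 := by omega
  subst hjn
  rw [List.getD_eq_getElem _ _ (by simp; omega)]
  rw [List.getElem_set_self (by simp; omega)]
  rw [show (n : Int) - 1 = ((n - 1 : Nat) : Int) from by omega, PySem.List.pyGetD_natCast]
  rw [sfx_last p n hn hpos]

lemma bs_go_spec (tab : List Int) (x : Int)
    (hmono : ∀ a b : Nat, a ≤ b → b < tab.length → tab.getD a 0 ≤ tab.getD b 0) :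
    ∀ (f : Nat) (l r : Int), 0 ≤ l → l ≤ r → r ≤ (tab.length : Int) → (r - l).toNat ≤ f →
    (∀ j : Nat, j < tab.length → (j : Int) < l → tab.getD j 0 ≤ x) →
    (∀ j : Nat, j < tab.length → r ≤ (j : Int) → x < tab.getD j 0) →
    ∃ k : Nat, iterative_binary_search_go tab x f l r = (k : Int) ∧ k ≤ tab.length ∧
      (∀ j : Nat, j < tab.length → j < k → tab.getD j 0 ≤ x) ∧
      (∀ j : Nat, j < tab.length → k ≤ j → x < tab.getD j 0) := by
  intro f
  induction f with
  | zero =>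
    intro l r h0 hlr hrn hfuel hlo hhi
    refine ⟨l.toNat, by simp [iterative_binary_search_go]; omega, by omega, ?_, ?_⟩
    · intro j hj hjk; exact hlo j hj (by omega)
    · intro j hj hjk; exact hhi j hj (by omega)
  | succ f ih =>
    intro l r h0 hlr hrn hfuel hlo hhi
    rw [iterative_binary_search_go]
    by_cases hc : l < r
    · rw [if_pos hc]
      simp only []
      have hmidlo : l ≤ PySem.Int.floordiv (l + r) 2 :=
        (PySem.Int.le_floordiv_iff_mul_le (by norm_num)).mpr (by omega)
      have hmidhi : PySem.Int.floordiv (l + r) 2 < r :=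
        (PySem.Int.floordiv_lt_iff_lt_mul (by norm_num)).mpr (by omega)
      set mid := PySem.Int.floordiv (l + r) 2 with hmid
      have hmidn : mid.toNat < tab.length := by omega
      have hgetm : PySem.List.pyGetD tab mid 0 = tab.getD mid.toNat 0 := by
        rw [PySem.List.pyGetD_of_nonneg _ _ (by omega)]
      by_cases hgt : PySem.List.pyGetD tab mid 0 > x
      · rw [if_pos hgt]
        refine ih l mid h0 hmidlo (by omega) (by omega) hlo ?_
        intro j hj hmj
        calc x < tab.getD mid.toNat 0 := by rw [← hgetm]; exact hgt
          _ ≤ tab.getD j 0 := hmono mid.toNat j (by omega) hj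
      · rw [if_neg hgt]
        refine ih (mid + 1) r (by omega) (by omega) hrn (by omega) ?_ hhi
        intro j hj hmj
        calc tab.getD j 0 ≤ tab.getD mid.toNat 0 := hmono j mid.toNat (by omega) hmidn
          _ ≤ x := by rw [← hgetm]; omega
    · rw [if_neg hc]
      refine ⟨l.toNat, by omega, by omega, ?_, ?_⟩
      · intro j hj hjk; exact hlo j hj (by omega)
      · intro j hj hjk; exact hhi j hj (by omega)

lemma bs_spec (tab : List Int) (x : Int)
    (hs : tab.Pairwise (· ≤ ·)) :
    ∃ k : Nat, iterative_binary_search tab 0 (tab.length : Int) x = (k : Int) ∧ k ≤ tab.length ∧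
      (∀ j : Nat, j < tab.length → j < k → tab.getD j 0 ≤ x) ∧
      (∀ j : Nat, j < tab.length → k ≤ j → x < tab.getD j 0) := by
  have hmono : ∀ a b : Nat, a ≤ b → b < tab.length → tab.getD a 0 ≤ tab.getD b 0 := by
    intro a b hab hb
    rcases Nat.lt_or_ge a b with h | h
    · rw [List.getD_eq_getElem _ _ (by omega), List.getD_eq_getElem _ _ hb]
      exact List.pairwise_iff_getElem.mp hs a b (by omega) hb h
    · have : a = b := by omega
      subst this; rfl
  unfold iterative_binary_search
  exact bs_go_spec tab x hmono _ 0 _ le_rfl (by omega) le_rfl (by omega)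
    (by intro j _ hj; omega) (by intro j hj hjl; omega)

lemma filter_eq_drop (p : List (Int × Int × Int)) (P : (Int × Int × Int) → Bool) (k : Nat)
    (hk : k ≤ p.length)
    (h1 : ∀ j, j < k → j < p.length → P (p.getD j (0, 0, 0)) = false)
    (h2 : ∀ j, k ≤ j → j < p.length → P (p.getD j (0, 0, 0)) = true) :
    p.filter P = p.drop k := by
  conv_lhs => rw [← List.take_append_drop k p]
  rw [List.filter_append]
  have ht : (p.take k).filter P = [] := by
    rw [List.filter_eq_nil_iff]
    intro a ha
    obtain ⟨i, hi, hgi⟩ := List.mem_iff_getElem.mp ha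
    have hil : i < p.length := by
      have := List.length_take_le k p
      omega
    have hik : i < k := by
      rw [List.length_take] at hi
      omega
    have : a = p.getD i (0,0,0) := by
      rw [List.getD_eq_getElem _ _ hil, ← hgi, List.getElem_take]
    rw [this]
    simp only [h1 i hik hil]
    exact Bool.false_ne_true
  have hd : (p.drop k).filter P = p.drop k := by
    rw [List.filter_eq_self]
    intro a ha
    obtain ⟨i, hi, hgi⟩ := List.mem_iff_getElem.mp ha
    rw [List.length_drop] at hi
    have : a = p.getD (k + i) (0,0,0) := by
      rw [List.getD_eq_getElem _ _ (by omega), ← hgi, List.getElem_drop]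
    rw [this]
    exact h2 (k+i) (by omega) (by omega)
  rw [ht, hd, List.nil_append]

lemma maxmatch_perm (l₁ l₂ : List Int) (h : l₁.Perm l₂) :
    (match PySem.List.max? l₁ (fun y => y) with | some mx => mx | none => 0) =
    (match PySem.List.max? l₂ (fun y => y) with | some mx => mx | none => 0) := by
  rcases h1 : PySem.List.max? l₁ (fun y => y) with _ | m₁ <;>
    rcases h2 : PySem.List.max? l₂ (fun y => y) with _ | m₂
  · rfl
  · rw [PySem.List.max?_eq_none_iff] at h1
    subst h1
    rw [← h.nil_eq, (PySem.List.max?_eq_none_iff ([] : List Int) (fun y => y)).mpr rfl] at h2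
    cases h2
  · rw [PySem.List.max?_eq_none_iff] at h2
    subst h2
    rw [h.eq_nil, (PySem.List.max?_eq_none_iff ([] : List Int) (fun y => y)).mpr rfl] at h1
    cases h1
  · simp only []
    have hm1 := PySem.List.max?_mem h1
    have hm2 := PySem.List.max?_mem h2
    exact le_antisymm (PySem.List.max?_isMax h2 m₁ (h.mem_iff.mp hm1))
      (PySem.List.max?_isMax h1 m₂ (h.mem_iff.mpr hm2))

lemma pvB_second_perm (l₁ l₂ : List (Int × Int × Int)) (h : l₁.Perm l₂) (e : Int) :
    pvB_second l₁ e = pvB_second l₂ e := by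
  unfold pvB_second
  exact maxmatch_perm _ _ ((h.filter _).map _)

lemma second_agree (p iv : List (Int × Int × Int)) (n : Nat)
    (hperm : p.Perm iv) (hn : p.length = n) (hpos : 1 ≤ n)
    (hpair : p.Pairwise (fun a b => a.1 ≤ b.1)) (e : Int) :
    pvA_second (p.map (fun t => t.1)) (pvA_m p n) n e = pvB_second iv e := by
  rw [← pvB_second_perm p iv hperm e]
  set s := p.map (fun t => t.1) with hs
  have hslen : s.length = n := by rw [hs, List.length_map, hn]
  have hspair : s.Pairwise (· ≤ ·) := List.pairwise_map.mpr hpair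
  have hsg : ∀ j, j < n → s.getD j 0 = (p.getD j (0,0,0)).1 := by
    intro j h
    rw [List.getD_eq_getElem _ _ (by omega), List.getD_eq_getElem _ _ (by omega)]
    simp only [hs, List.getElem_map]
  obtain ⟨k, hbs, hk, hlo, hhi⟩ := bs_spec s e hspair
  rw [hslen] at hbs hk hlo hhi
  obtain ⟨hmlen, hmval⟩ := m_spec p n hn hpos
  unfold pvA_second pvB_second
  rw [hbs]
  have hfd : p.filter (fun u => decide (e < u.1)) = p.drop k := by
    apply filter_eq_drop p _ k (by omega)
    · intro j hj hjl
      simp only [decide_eq_false_iff_not, not_lt]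
      rw [← hsg j (by omega)]
      exact hlo j (by omega) hj
    · intro j hj hjl
      simp only [decide_eq_true_eq]
      rw [← hsg j (by omega)]
      exact hhi j (by omega) hj
  rw [hfd]
  by_cases hkn : k < n
  · rw [if_pos ?side]
    case side =>
      constructor
      · exact_mod_cast hkn
      · rw [PySem.List.pyGetD_natCast, List.getD_eq_getElem _ _ (by omega)]
        have := hhi k (by omega) le_rfl
        rw [List.getD_eq_getElem _ _ (by omega)] at this
        omega
    rw [PySem.List.pyGetD_natCast, List.getD_eq_getElem _ _ (by omega),
        ← List.getD_eq_getElem _ _ (by omega : k < (pvA_m p n).length), hmval k hkn]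
    have hklt : k < p.length := by omega
    rw [show pvSfx p k = _ from by rw [pvSfx, List.drop_eq_getElem_cons hklt]]
    rw [List.drop_eq_getElem_cons hklt, List.map_cons, PySem.List.max?_id_cons]
  · rw [if_neg (fun hcontra => hkn (by exact_mod_cast hcontra.1))]
    rw [List.drop_eq_nil_of_le (by omega), List.map_nil]
    rfl



-- ===== VERDICT (by name: the statement is the Claim_ definition above) =====
theorem reklamy_spec : Claim_equal_reklamy := by
  intro T S o _ hpre
  unfold Spec_reklamy reklamy reklamy_alt
  have hAB : pvA_mkP T S = pvB_mkIv T S := rfl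
  set iv := pvB_mkIv T S with hiv
  set n := T.length with hnn
  set p := PySem.List.sorted (pvA_mkP T S) (fun t => t.1) false with hp
  have hperm : p.Perm iv := by rw [hp, hAB]; exact PySem.List.sorted_perm _ _ _
  have hn : p.length = n := by
    simp [hp, PySem.List.length_sorted, pvA_mkP]
    rw [hnn]
  have hpos : 1 ≤ n := by
    rcases hpre with ⟨hne, -, -⟩
    rw [hnn]
    cases T with
    | nil => exact absurd rfl hne
    | cons a t => simp
  have hpair : p.Pairwise (fun a b => a.1 ≤ b.1) := PySem.List.sorted_pairwise _ _
  have hfun : ∀ (r : Int), ∀ t ∈ p,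
      max r (t.2.2 + pvA_second (p.map (fun t => t.1)) (pvA_m p n) n t.2.1) =
      max r (t.2.2 + pvB_second iv t.2.1) := by
    intro r t _
    rw [second_agree p iv n hperm hn hpos hpair]
  rw [PySem.List.foldl_congr_mem p _ _ 0 hfun]
  exact @List.Perm.foldl_eq _ _
    (fun result t => max result (t.2.2 + pvB_second iv t.2.1)) _ _
    ⟨fun r a b => by rw [max_right_comm]⟩ hperm 0

theorem reklamy_raises : Claim_raises_reklamy := by
  unfold Claim_raises_reklamy
  exact ⟨fun T S o _ hR hP => hP.1 hR, by decide⟩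

-- self-check: at the raise witness the excluded region indeed falls outside Pre_
theorem reklamy_raises_witness :
    ¬ Pre_reklamy pvRaiseWitness_reklamy.1 pvRaiseWitness_reklamy.2.1 pvRaiseWitness_reklamy.2.2 :=
  reklamy_raises.1 pvRaiseWitness_reklamy.1 pvRaiseWitness_reklamy.2.1
    pvRaiseWitness_reklamy.2.2 (by decide) (by decide)
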